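-- pv_equiv track=rewrite | github.com/tensajougan8/IR | permuted index.py | get_permuted_words
-- ===== SOURCE A (Python) =====
-- def get_permuted_words(permuted_word, permuted_index_map):
--     key_words = []
--     for i in permuted_word:
--         keylen = i.rfind('*')
--         base = i[:keylen]
--         for j in permuted_index_map:
--              if base in j:
--                  if base[:1] == j[:1]:
--                      key_words.append(permuted_index_map[j])
--
--     return key_words
-- ===== SOURCE B (Python) =====
-- def get_permuted_words(permuted_word, permuted_index_map):
--     # Bucket the index keys by their first character once, then per word
--     # scan only the bucket matching the base's first character.
--     buckets = {}
--     for j, v in permuted_index_map.items():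
--         buckets.setdefault(j[:1], []).append((j, v))
--     key_words = []
--     for i in permuted_word:
--         base = i[:i.rfind('*')]
--         for j, v in buckets.get(base[:1], []):
--             if base in j:
--                 key_words.append(v)
--     return key_words
-- ===== Notes on version B (the rewrite author's own statement) =====
-- stated objective: alternative
-- what changed: B pre-groups the index entries into a dict of buckets keyed by the key's first character and, per word, scans only the bucket for the base's first character, instead of A's scan of the whole dict with a first-character test inside the loop; Pre_ only excludes association lists with duplicate keys, which do not represent any Python dict.
import Mathlib
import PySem

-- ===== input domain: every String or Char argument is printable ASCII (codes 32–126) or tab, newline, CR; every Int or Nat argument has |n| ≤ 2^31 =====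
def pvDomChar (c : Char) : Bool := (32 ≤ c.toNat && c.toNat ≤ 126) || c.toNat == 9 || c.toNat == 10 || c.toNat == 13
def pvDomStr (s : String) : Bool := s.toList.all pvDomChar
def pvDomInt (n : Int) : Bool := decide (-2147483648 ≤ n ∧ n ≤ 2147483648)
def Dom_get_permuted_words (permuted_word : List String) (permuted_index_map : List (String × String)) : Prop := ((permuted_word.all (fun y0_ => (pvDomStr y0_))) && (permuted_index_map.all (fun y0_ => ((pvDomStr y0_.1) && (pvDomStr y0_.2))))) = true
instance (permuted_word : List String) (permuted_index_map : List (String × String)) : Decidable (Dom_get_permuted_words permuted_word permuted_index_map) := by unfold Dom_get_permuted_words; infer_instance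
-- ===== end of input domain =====

-- B groups the index entries into first-character buckets once and scans only the matching bucket per word (alternative decomposition; same results).


-- ===== PORT A =====
-- for i in permuted_word: base = i[:i.rfind('*')]; for j in dict: if base in j and base[:1]==j[:1]: append dict[j]
def get_permuted_words (permuted_word : List String) (permuted_index_map : List (String × String)) : List String :=
  permuted_word.foldl (fun key_words i =>
    let base := PySem.Str.slice i none (some (PySem.Str.rfind i "*"))
    permuted_index_map.foldl (fun acc jv =>
      if PySem.Str.isIn base jv.1 then
        if PySem.Str.slice base none (some 1) = PySem.Str.slice jv.1 none (some 1) then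
          acc ++ [(PySem.Dict.mk permuted_index_map).getD jv.1 ""]
        else acc
      else acc) key_words) []

-- ===== PORT B =====
def get_permuted_words_alt (permuted_word : List String) (permuted_index_map : List (String × String)) : List String :=
  let buckets : PySem.Dict String (List (String × String)) :=
    permuted_index_map.foldl
      (fun d jv => d.modify (PySem.Str.slice jv.1 none (some 1)) [] (· ++ [jv])) PySem.Dict.empty
  permuted_word.foldl (fun key_words i =>
    let base := PySem.Str.slice i none (some (PySem.Str.rfind i "*"))
    (buckets.getD (PySem.Str.slice base none (some 1)) []).foldl
      (fun acc jv => if PySem.Str.isIn base jv.1 then acc ++ [jv.2] else acc) key_words) []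

-- ===== PRECONDITION & SPEC =====
-- Pre_ excludes association lists with duplicate keys: they do not represent any Python dict
-- (building the dict collapses them), so A's first-match lookup there is not a dict behaviour.
def Pre_get_permuted_words (permuted_word : List String) (permuted_index_map : List (String × String)) : Prop :=
  (permuted_index_map.map (fun p => p.1.toList)).Nodup
instance (permuted_word : List String) (permuted_index_map : List (String × String)) : Decidable (Pre_get_permuted_words permuted_word permuted_index_map) := by unfold Pre_get_permuted_words; infer_instance
def pvWitness_get_permuted_words : List String × (List (String × String)) := (["ab*c"], [("ab", "1"), ("b", "2")])

def Spec_get_permuted_words (permuted_word : List String) (permuted_index_map : List (String × String)) (out : List String) : Prop := out = get_permuted_words_alt permuted_word permuted_index_map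
instance (permuted_word : List String) (permuted_index_map : List (String × String)) (out : List String) : Decidable (Spec_get_permuted_words permuted_word permuted_index_map out) := by unfold Spec_get_permuted_words; infer_instance

-- ===== CLAIM (what is proved, stated in full; the proofs are below) =====
def Claim_equal_get_permuted_words : Prop := ∀ (permuted_word : List String) (permuted_index_map : List (String × String)), Dom_get_permuted_words permuted_word permuted_index_map → Pre_get_permuted_words permuted_word permuted_index_map → Spec_get_permuted_words permuted_word permuted_index_map (get_permuted_words permuted_word permuted_index_map)

-- ===== LEMMAS AND PROOFS =====

-- The bucket B's dict hands back for first-character c is exactly the index entries whose key starts with c, in order.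
theorem pv_bucket (pim : List (String × String)) (c : String) :
    (pim.foldl (fun d jv => d.modify (PySem.Str.slice jv.1 none (some 1)) [] (· ++ [jv]))
       (PySem.Dict.empty : PySem.Dict String (List (String × String)))).getD c []
    = pim.filter (fun jv => PySem.Str.slice jv.1 none (some 1) == c) := by
  have h := PySem.Dict.getD_foldl_modify_append
    (l := pim.map (fun jv : String × String => (PySem.Str.slice jv.1 none (some 1), jv)))
    (d := (PySem.Dict.empty : PySem.Dict String (List (String × String)))) (c := c)
  rw [List.foldl_map] at h
  rw [h, PySem.Dict.getD_empty]
  simp [List.filter_map, List.map_map, Function.comp_def]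

-- A's inner scan over the whole dict, under unique keys, appends exactly the matching entries' values.
theorem pv_innerA (pim : List (String × String)) (hnd : (pim.map Prod.fst).Nodup) (base : String) (acc : List String) :
    pim.foldl (fun acc jv =>
      if PySem.Str.isIn base jv.1 then
        if PySem.Str.slice base none (some 1) = PySem.Str.slice jv.1 none (some 1) then
          acc ++ [(PySem.Dict.mk pim).getD jv.1 ""]
        else acc
      else acc) acc
    = acc ++ ((pim.filter (fun jv => PySem.Str.slice jv.1 none (some 1) == PySem.Str.slice base none (some 1))).filter
        (fun jv => PySem.Str.isIn base jv.1)).map Prod.snd := by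
  trans (pim.foldl (fun acc (jv : String × String) =>
      if (PySem.Str.isIn base jv.1 && (PySem.Str.slice jv.1 none (some 1) == PySem.Str.slice base none (some 1))) then
        acc ++ [jv.2] else acc) acc)
  · apply PySem.List.foldl_congr_mem
    intro a jv hm
    have hv : (PySem.Dict.mk pim).getD jv.1 "" = jv.2 :=
      PySem.Dict.getD_of_mem_items (d := PySem.Dict.mk pim) hm hnd ""
    by_cases h1 : PySem.Str.isIn base jv.1
    · by_cases h2 : PySem.Str.slice base none (some 1) = PySem.Str.slice jv.1 none (some 1)
      · simp [h2, hv]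
      · have h2' : (PySem.Str.slice jv.1 none (some 1) == PySem.Str.slice base none (some 1)) = false :=
          beq_eq_false_iff_ne.mpr (fun e => h2 e.symm)
        simp [h2, h2']
    · have h1' : PySem.Chars.isIn base.toList jv.1.toList ≠ true := by simpa using h1
      simp [h1']
  · rw [PySem.List.foldl_append_if, List.filter_filter]

-- ===== VERDICT (by name: the statement is the Claim_ definition above) =====
theorem get_permuted_words_spec : Claim_equal_get_permuted_words := by
  intro pw pim _dom pre
  have pre' : (pim.map Prod.fst).Nodup := by
    have h : ((pim.map Prod.fst).map String.toList).Nodup := by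
      simpa [List.map_map, Function.comp_def] using pre
    exact h.of_map _
  unfold Spec_get_permuted_words get_permuted_words get_permuted_words_alt
  apply PySem.List.foldl_congr_mem
  intro acc i _
  simp only []
  rw [pv_innerA pim pre', pv_bucket, PySem.List.foldl_append_if]
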